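-- pv_equiv track=rewrite | github.com/clee421/advent-of-code | 2023/day13/run.py | validate_horizontal_split
-- ===== SOURCE A (Python) =====
-- from typing import Dict, List, Tuple, Set
--
-- def validate_horizontal_split(entry: Tuple[int], pattern: List[str]) -> bool:
--     if abs(entry[0] - entry[1]) > 1:
--         return False
--
--     # same BS as above
--     # pattern_len = len(pattern)
--     # required_matches = int(pattern_len / 2)
--     # for i in range(required_matches):
--     #     j1, j2 = entry[0] - i, (entry[1] + i) % pattern_len
--     #     if pattern[j1] != pattern[j2]:
--     #         return False
--
--     j1, j2 = entry[0], entry[1]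
--     while j1 >= 0 and j2 < len(pattern):
--         if pattern[j1] != pattern[j2]:
--             return False
--         j1 -= 1
--         j2 += 1
--
--     return True
-- ===== SOURCE B (Python) =====
-- def validate_horizontal_split(entry, pattern):
--     d0, d1 = entry[0], entry[1]
--     if abs(d0 - d1) > 1:
--         return False
--     n = len(pattern)
--     k = min(d0 + 1, n - d1)
--     if k <= 0:
--         return True
--     return pattern[d0 - k + 1:d0 + 1][::-1] == pattern[d1:d1 + k]
-- ===== Notes on version B (the rewrite author's own statement) =====
-- stated objective: simpler
-- what changed: Replaces A's two-pointer outward while-loop over individual rows by computing the overlap length k = min(d0+1, n-d1) in closed form and comparing the reversed top slice against the bottom slice as whole lists.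
-- intended difference: On entry starting (0, -1) with a nonempty pattern whose first row equals its last, A's negative index wraps around, compares row 0 with the last row and returns True; B returns False, the intended value, since no reflection exists at a negative split position. — e.g. on validate_horizontal_split([0, -1], ["#"]): A returns true, B returns false
-- outside the precondition, e.g. on validate_horizontal_split((1, 0), ['#']): A raises IndexError, B returns False; on validate_horizontal_split((5,), ['#']): A raises IndexError, B raises IndexError
import Mathlib
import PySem

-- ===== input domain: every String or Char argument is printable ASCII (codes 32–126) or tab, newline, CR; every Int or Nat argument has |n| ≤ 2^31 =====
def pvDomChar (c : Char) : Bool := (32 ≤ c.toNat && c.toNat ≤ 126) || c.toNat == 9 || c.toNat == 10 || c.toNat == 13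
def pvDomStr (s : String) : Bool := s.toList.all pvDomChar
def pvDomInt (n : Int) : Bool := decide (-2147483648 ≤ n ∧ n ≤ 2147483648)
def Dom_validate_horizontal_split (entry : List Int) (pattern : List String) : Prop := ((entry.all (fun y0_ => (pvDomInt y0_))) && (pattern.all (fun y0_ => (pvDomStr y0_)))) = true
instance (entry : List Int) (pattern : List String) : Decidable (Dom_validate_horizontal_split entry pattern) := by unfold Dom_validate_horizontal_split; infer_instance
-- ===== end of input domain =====

-- B replaces A's two-pointer outward walk by computing the overlap length k and comparing
-- the reversed top slice with the bottom slice (objective: simpler). On entry (0,-1) with a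
-- nonempty pattern whose first row equals its last, A's negative-index wraparound returns
-- True while B returns False (see D_ below).


-- ===== PORT A =====
-- A's while loop; the fuel argument only makes the recursion structural (A calls it with
-- pattern.length + 2 fuel, more than the loop can ever iterate).
def pvLoopA (p : List String) : Nat → Int → Int → Bool
  | 0, _, _ => true
  | fuel + 1, j1, j2 =>
    if 0 ≤ j1 ∧ j2 < (p.length : Int) then
      match PySem.List.pyGet? p j1, PySem.List.pyGet? p j2 with
      | some x, some y => if x ≠ y then false else pvLoopA p fuel (j1 - 1) (j2 + 1)
      | _, _ => false   -- IndexError (pattern[j1] out of range); excluded by Pre_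
    else true

def validate_horizontal_split (entry : List Int) (pattern : List String) : Bool :=
  match PySem.List.pyGet? entry 0, PySem.List.pyGet? entry 1 with
  | some e0, some e1 =>
    if (e0 - e1).natAbs > 1 then false
    else pvLoopA pattern (pattern.length + 2) e0 e1
  | _, _ => false   -- IndexError on entry[0]/entry[1]; excluded by Pre_

-- ===== PORT B =====
def validate_horizontal_split_alt (entry : List Int) (pattern : List String) : Bool :=
  match PySem.List.pyGet? entry 0, PySem.List.pyGet? entry 1 with
  | some d0, some d1 =>
    if (d0 - d1).natAbs > 1 then false
    else
      let n : Int := pattern.length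
      let k : Int := min (d0 + 1) (n - d1)
      if k ≤ 0 then true
      else decide ((PySem.List.slice pattern (some (d0 - k + 1)) (some (d0 + 1))).reverse
                   = PySem.List.slice pattern (some d1) (some (d1 + k)))
  | _, _ => false   -- IndexError on entry[0]/entry[1]; excluded by Pre_

-- ===== PRECONDITION & SPEC =====
-- Pre_ excludes exactly the inputs where A raises IndexError: entry shorter than 2, and the
-- case where the loop is entered with entry[0] = len(pattern) (then pattern[j1] is out of range).
def Pre_validate_horizontal_split (entry : List Int) (pattern : List String) : Prop :=
  2 ≤ entry.length ∧
  ((entry.getD 0 0 - entry.getD 1 0).natAbs ≤ 1 → 0 ≤ entry.getD 0 0 →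
    entry.getD 1 0 < (pattern.length : Int) → entry.getD 0 0 < (pattern.length : Int))
instance (entry : List Int) (pattern : List String) : Decidable (Pre_validate_horizontal_split entry pattern) := by unfold Pre_validate_horizontal_split; infer_instance

def pvWitness_validate_horizontal_split : List Int × List String := ([0, 1], ["#.#", "#.#"])

-- On entry starting (0, -1) with a nonempty pattern whose first row equals its last, A's
-- negative index wraps around and compares row 0 with the last row, returning True although no
-- reflection at a negative split exists; B returns the intended False there.
def D_validate_horizontal_split (entry : List Int) (pattern : List String) : Prop :=
  2 ≤ entry.length ∧ entry.getD 0 0 = 0 ∧ entry.getD 1 0 = -1 ∧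
  pattern ≠ [] ∧ pattern.head? = pattern.getLast?
instance (entry : List Int) (pattern : List String) : Decidable (D_validate_horizontal_split entry pattern) := by unfold D_validate_horizontal_split; infer_instance

def Spec_validate_horizontal_split (entry : List Int) (pattern : List String) (out : Bool) : Prop := ¬ D_validate_horizontal_split entry pattern → out = validate_horizontal_split_alt entry pattern
instance (entry : List Int) (pattern : List String) (out : Bool) : Decidable (Spec_validate_horizontal_split entry pattern out) := by unfold Spec_validate_horizontal_split; infer_instance

def pvDiffWitness_validate_horizontal_split : List Int × List String := ([0, -1], ["#"])
def pvDiffWitnessOut_validate_horizontal_split : Bool × Bool := (true, false)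

-- ===== CLAIM (what is proved, stated in full; the proofs are below) =====
def Claim_unchanged_validate_horizontal_split : Prop := ∀ (entry : List Int) (pattern : List String), Dom_validate_horizontal_split entry pattern → Pre_validate_horizontal_split entry pattern → Spec_validate_horizontal_split entry pattern (validate_horizontal_split entry pattern)
def Claim_changed_validate_horizontal_split : Prop := Dom_validate_horizontal_split (pvDiffWitness_validate_horizontal_split.1) (pvDiffWitness_validate_horizontal_split.2) ∧ Pre_validate_horizontal_split (pvDiffWitness_validate_horizontal_split.1) (pvDiffWitness_validate_horizontal_split.2) ∧ D_validate_horizontal_split (pvDiffWitness_validate_horizontal_split.1) (pvDiffWitness_validate_horizontal_split.2) ∧ validate_horizontal_split (pvDiffWitness_validate_horizontal_split.1) (pvDiffWitness_validate_horizontal_split.2) = pvDiffWitnessOut_validate_horizontal_split.1 ∧ validate_horizontal_split_alt (pvDiffWitness_validate_horizontal_split.1) (pvDiffWitness_validate_horizontal_split.2) = pvDiffWitnessOut_validate_horizontal_split.2 ∧ pvDiffWitnessOut_validate_horizontal_split.1 ≠ pvDiffWitnessOut_validate_horizontal_split.2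
def Claim_exact_validate_horizontal_split : Prop := ∀ (entry : List Int) (pattern : List String), Dom_validate_horizontal_split entry pattern → Pre_validate_horizontal_split entry pattern → D_validate_horizontal_split entry pattern → validate_horizontal_split entry pattern ≠ validate_horizontal_split_alt entry pattern

-- ===== LEMMAS AND PROOFS =====

-- A's loop equals a reversed-top-slice / bottom-slice comparison (stated over drop/take with
-- Nat bounds; a = j1 + 1, so a = 0 is the already-terminated loop).
lemma pvLoopA_eq_slice (p : List String) :
    ∀ (a b fuel : Nat), a ≤ fuel → a ≤ p.length →
    pvLoopA p fuel ((a : Int) - 1) (b : Int)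
      = decide ((((p.drop (a - min a (p.length - b))).take (min a (p.length - b))).reverse)
               = (p.drop b).take (min a (p.length - b))) := by
  intro a
  induction a with
  | zero =>
    intro b fuel _ _
    cases fuel with
    | zero => simp [pvLoopA]
    | succ f => simp [pvLoopA]
  | succ a ih =>
    intro b fuel hfuel ha
    cases fuel with
    | zero => omega
    | succ f =>
    by_cases hb : b < p.length
    · -- loop body runs
      have ha' : a < p.length := by omega
      have h1 : PySem.List.pyGet? p ((↑(a+1) : Int) - 1) = some p[a] := by
        have : ((↑(a+1) : Int) - 1) = (a : Int) := by push_cast; ring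
        rw [this, PySem.List.pyGet?_natCast]
        simp [ha']
      have h2 : PySem.List.pyGet? p (b : Int) = some p[b] := by
        rw [PySem.List.pyGet?_natCast]; simp [hb]
      set k := min (a+1) (p.length - b) with hk
      have hk1 : 1 ≤ k := by omega
      have hka : k ≤ a + 1 := by omega
      -- decompose top slice
      have htop : (p.drop (a + 1 - k)).take k
          = (p.drop (a + 1 - k)).take (k - 1) ++ [p[a]] := by
        have : k = (k - 1) + 1 := by omega
        rw [this, List.take_add_one]
        have hg : (p.drop (a + 1 - k))[k-1]? = some p[a] := by
          rw [List.getElem?_drop]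
          have : a + 1 - k + (k - 1) = a := by omega
          rw [this]; simp [ha']
        simp only [show k - 1 + 1 - 1 = k - 1 from by omega,
          show a + 1 - (k - 1 + 1) = a + 1 - k from by omega, hg, Option.toList_some]
      have hbot : (p.drop b).take k = p[b] :: (p.drop (b + 1)).take (k - 1) := by
        rw [List.drop_eq_getElem_cons hb]
        have : k = (k - 1) + 1 := by omega
        rw [this, List.take_succ_cons]
        simp only [show k - 1 + 1 - 1 = k - 1 from by omega]
      have hrec : min a (p.length - (b+1)) = k - 1 := by omega
      have harg : ((↑(a+1) : Int) - 1 - 1) = ((a : Int) - 1) := by push_cast; ring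
      have harg2 : ((b : Int) + 1) = ((b + 1 : Nat) : Int) := by push_cast; ring
      rw [show pvLoopA p (f+1) ((↑(a+1) : Int) - 1) (b : Int)
          = if 0 ≤ ((↑(a+1) : Int) - 1) ∧ (b:Int) < (p.length : Int) then
              match PySem.List.pyGet? p ((↑(a+1) : Int) - 1), PySem.List.pyGet? p (b:Int) with
              | some x, some y => if x ≠ y then false else pvLoopA p f ((↑(a+1) : Int) - 1 - 1) ((b:Int) + 1)
              | _, _ => false
            else true from rfl]
      rw [if_pos (by constructor <;> [push_cast; skip] <;> omega), h1, h2]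
      rw [htop, hbot]
      by_cases heq : p[a] = p[b]
      · simp only [heq, ne_eq, not_true_eq_false, ite_false]
        rw [harg, harg2, ih (b+1) f (by omega) (by omega), hrec,
          show a - (k - 1) = a + 1 - k from by omega]
        simp
      · simp [heq]
    · -- loop doesn't run: b ≥ n
      have hk0 : min (a+1) (p.length - b) = 0 := by omega
      rw [hk0]
      simp [pvLoopA]
      omega

-- A's loop, started inside the valid band, equals B's reversed-slice comparison.
lemma loop_eq_sliceInt (pattern : List String) (e0 e1 : Int) (h0 : 0 ≤ e0) (h1 : 0 ≤ e1)
    (h1n : e1 < (pattern.length : Int)) (h0n : e0 < (pattern.length : Int)) :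
    pvLoopA pattern (pattern.length + 2) e0 e1
      = decide ((PySem.List.slice pattern (some (e0 - min (e0 + 1) ((pattern.length:Int) - e1) + 1)) (some (e0 + 1))).reverse
               = PySem.List.slice pattern (some e1) (some (e1 + min (e0 + 1) ((pattern.length:Int) - e1)))) := by
  set n := pattern.length with hn
  set k := min (e0 + 1) ((n:Int) - e1) with hkdef
  have hke : k ≤ e0 + 1 := min_le_left _ _
  have h := pvLoopA_eq_slice pattern (e0.toNat + 1) e1.toNat (n + 2) (by omega) (by omega)
  rw [show ((e0.toNat + 1 : Nat) : Int) - 1 = e0 from by omega,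
      show ((e1.toNat : Nat) : Int) = e1 from by omega] at h
  rw [h]
  rw [PySem.List.slice_toNat _ (by omega) (by omega), PySem.List.slice_toNat _ (by omega) (by omega)]
  rw [show min (e0.toNat + 1) (n - e1.toNat) = k.toNat from by omega,
      show e0.toNat + 1 - k.toNat = (e0 - k + 1).toNat from by omega,
      show (e0 + 1).toNat - (e0 - k + 1).toNat = k.toNat from by omega,
      show (e1 + k).toNat - e1.toNat = k.toNat from by omega]

-- B's bottom slice pattern[-1:0] is empty.
lemma slice_neg_one_zero (pattern : List String) :
    PySem.List.slice pattern (some (-1)) (some (-1 + 1)) = [] := by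
  have h := PySem.List.length_slice pattern (-1) (-1 + 1)
  have h1 : PySem.List.clampIdx pattern.length (-1 + 1) = 0 := by
    norm_num [PySem.List.clampIdx]
  rw [h1] at h
  exact List.eq_nil_of_length_eq_zero (by omega)

theorem validate_horizontal_split_spec : Claim_unchanged_validate_horizontal_split := by
  intro entry pattern _ hpre
  unfold Spec_validate_horizontal_split
  intro hnD
  obtain ⟨hlen, hidx⟩ := hpre
  match entry with
  | e0 :: e1 :: rest =>
  simp only [List.getD_cons_zero, List.getD_cons_succ] at hidx hnD
  have hg0 : PySem.List.pyGet? (e0 :: e1 :: rest) 0 = some e0 := PySem.List.pyGet?_zero_cons _ _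
  have hg1 : PySem.List.pyGet? (e0 :: e1 :: rest) 1 = some e1 := by
    rw [show (1:Int) = ((1:Nat):Int) from rfl, PySem.List.pyGet?_natCast]; rfl
  unfold validate_horizontal_split validate_horizontal_split_alt
  rw [hg0, hg1]
  dsimp only
  by_cases hab : (e0 - e1).natAbs > 1
  · simp [hab]
  · rw [if_neg hab, if_neg hab]
    by_cases h0 : 0 ≤ e0
    · by_cases h1n : e1 < (pattern.length : Int)
      · have h0n : e0 < (pattern.length : Int) := hidx (by omega) h0 h1n
        by_cases h1 : 0 ≤ e1
        · -- main band: loop vs slices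
          rw [loop_eq_sliceInt pattern e0 e1 h0 h1 h1n h0n]
          rw [if_neg (by omega)]
        · -- wraparound corner: e0 = 0, e1 = -1, heads must differ (¬ D_)
          have he0 : e0 = 0 := by omega
          have he1 : e1 = -1 := by omega
          subst he0; subst he1
          have hne : pattern.head? ≠ pattern.getLast? := by
            intro hh
            exact hnD ⟨by simp, rfl, rfl, by intro h; subst h; simp at h0n, hh⟩
          match pattern, hne with
          | q :: qs, hne =>
          have hgl : ∃ l, (q :: qs).getLast? = some l := by
            cases h : (q :: qs).getLast? with
            | none => simp at h
            | some l => exact ⟨l, rfl⟩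
          obtain ⟨l, hl⟩ := hgl
          have hql : q ≠ l := by
            intro h; subst h; exact hne (by rw [hl]; rfl)
          -- A: one comparison via wraparound, then false
          have hA : pvLoopA (q :: qs) ((q :: qs).length + 2) 0 (-1) = false := by
            simp only [pvLoopA]
            rw [if_pos (by constructor <;> [omega; simp])]
            rw [PySem.List.pyGet?_zero_cons, PySem.List.pyGet?_neg_one, hl]
            simp [hql]
          rw [hA, if_neg (by simp; omega)]
          rw [show (0 : Int) - min (0 + 1) (((q :: qs).length : Int) - -1) + 1 = 0 from by
                simp; omega,
              show min ((0:Int) + 1) (((q :: qs).length : Int) - -1) = 1 from by simp; omega]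
          rw [slice_neg_one_zero]
          have htop : PySem.List.slice (q :: qs) (some 0) (some (0 + 1)) = [q] := by
            rw [PySem.List.slice_toNat _ (by omega) (by omega)]; rfl
          rw [htop]
          simp
      · -- e1 ≥ n: loop never entered, k ≤ 0
        have hA : pvLoopA pattern (pattern.length + 2) e0 e1 = true := by
          simp only [pvLoopA]; rw [if_neg (by omega)]
        rw [hA, if_pos (by omega)]
    · -- e0 < 0: loop never entered, k ≤ 0
      have hA : pvLoopA pattern (pattern.length + 2) e0 e1 = true := by
        simp only [pvLoopA]; rw [if_neg (by omega)]
      rw [hA, if_pos (by omega)]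

theorem validate_horizontal_split_changed : Claim_changed_validate_horizontal_split := by
  unfold Claim_changed_validate_horizontal_split; decide

theorem validate_horizontal_split_tight : Claim_exact_validate_horizontal_split := by
  intro entry pattern _ _ hD
  obtain ⟨hlen, he0, he1, hne, hhl⟩ := hD
  match entry, pattern with
  | e0 :: e1 :: rest, q :: qs =>
  simp only [List.getD_cons_zero, List.getD_cons_succ] at he0 he1
  subst he0; subst he1
  have hgl : ∃ l, (q :: qs).getLast? = some l := by
    cases h : (q :: qs).getLast? with
    | none => simp at h
    | some l => exact ⟨l, rfl⟩
  obtain ⟨l, hl⟩ := hgl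
  have hql : q = l := by
    rw [hl] at hhl; simpa using hhl
  have hg0 : PySem.List.pyGet? (0 :: -1 :: rest) 0 = some 0 := PySem.List.pyGet?_zero_cons _ _
  have hg1 : PySem.List.pyGet? (0 :: -1 :: rest) 1 = some (-1) := by
    rw [show (1:Int) = ((1:Nat):Int) from rfl, PySem.List.pyGet?_natCast]; rfl
  unfold validate_horizontal_split validate_horizontal_split_alt
  rw [hg0, hg1]
  dsimp only
  rw [if_neg (by simp), if_neg (by simp)]
  -- A: the wrapped comparison succeeds, then j1 = -1 ends the loop: true
  have hA : pvLoopA (q :: qs) ((q :: qs).length + 2) 0 (-1) = true := by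
    simp only [pvLoopA]
    rw [if_pos (by constructor <;> [omega; simp])]
    rw [PySem.List.pyGet?_zero_cons, PySem.List.pyGet?_neg_one, hl]
    dsimp only
    rw [if_neg (by simp [hql])]
    rw [if_neg (by omega)]
  rw [hA]
  -- B: k = 1, top = [q], bottom = [], so false
  rw [if_neg (by simp; omega)]
  rw [show (0 : Int) - min (0 + 1) (((q :: qs).length : Int) - -1) + 1 = 0 from by simp; omega,
      show min ((0:Int) + 1) (((q :: qs).length : Int) - -1) = 1 from by simp; omega]
  rw [slice_neg_one_zero]
  have htop : PySem.List.slice (q :: qs) (some 0) (some (0 + 1)) = [q] := by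
    rw [PySem.List.slice_toNat _ (by omega) (by omega)]; rfl
  rw [htop]
  simp
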